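-- pv_equiv track=rewrite | github.com/PayamFardRepo/DermaIntel | backend/insurance_preauth.py | generate_clinical_rationale
-- ===== SOURCE A (Python) =====
-- from typing import Dict, List, Optional, Any
--
-- def generate_clinical_rationale(
--     condition: str,
--     severity: Optional[str] = None,
--     clinical_findings: Optional[Dict] = None
-- ) -> str:
--     """Generate clinical rationale for procedures."""
--
--     rationale = f"Patient presents with dermatological lesion consistent with {condition}. "
--
--     if any(term in condition.lower() for term in ["melanoma", "carcinoma", "malignant"]):
--         rationale += ("AI analysis indicates features concerning for malignancy. "
--                      "Tissue diagnosis is medically necessary for definitive diagnosis "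
--                      "and to guide appropriate treatment. Early detection and treatment "
--                      "significantly impact prognosis and survival outcomes.")
--     elif "actinic keratosis" in condition.lower():
--         rationale += ("This premalignant condition has risk of progression to invasive "
--                      "squamous cell carcinoma. Treatment is preventive care and represents "
--                      "standard of care to reduce cancer risk.")
--     elif any(term in condition.lower() for term in ["dermatitis", "eczema", "psoriasis"]):
--         rationale += ("Chronic inflammatory skin condition requires comprehensive evaluation "
--                      "and treatment. Condition significantly impacts quality of life and may "
--                      "lead to complications if untreated. Treatment follows evidence-based "
--                      "guidelines and is medically necessary.")
--     else:
--         rationale += ("Clinical and AI-assisted evaluation indicates need for professional "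
--                      "dermatological assessment. Appropriate diagnostic procedures are necessary "
--                      "for accurate diagnosis and treatment planning.")
--
--     if clinical_findings and clinical_findings.get("red_flags"):
--         rationale += f" Red flag indicators present: {', '.join(clinical_findings['red_flags'])}."
--
--     return rationale
-- ===== SOURCE B (Python) =====
-- from typing import Dict, List, Optional, Any
--
-- # Flat keyword -> tier map; tier index selects the rationale block (3 = default).
-- _KEYWORD_TIER = {
--     "melanoma": 0, "carcinoma": 0, "malignant": 0,
--     "actinic keratosis": 1,
--     "dermatitis": 2, "eczema": 2, "psoriasis": 2,
-- }
--
-- _BLOCKS = [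
--     ("AI analysis indicates features concerning for malignancy. "
--      "Tissue diagnosis is medically necessary for definitive diagnosis "
--      "and to guide appropriate treatment. Early detection and treatment "
--      "significantly impact prognosis and survival outcomes."),
--     ("This premalignant condition has risk of progression to invasive "
--      "squamous cell carcinoma. Treatment is preventive care and represents "
--      "standard of care to reduce cancer risk."),
--     ("Chronic inflammatory skin condition requires comprehensive evaluation "
--      "and treatment. Condition significantly impacts quality of life and may "
--      "lead to complications if untreated. Treatment follows evidence-based "
--      "guidelines and is medically necessary."),
--     ("Clinical and AI-assisted evaluation indicates need for professional "
--      "dermatological assessment. Appropriate diagnostic procedures are necessary "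
--      "for accurate diagnosis and treatment planning."),
-- ]
--
-- def generate_clinical_rationale(
--     condition: str,
--     severity: Optional[str] = None,
--     clinical_findings: Optional[Dict] = None
-- ) -> str:
--     """Generate clinical rationale: score every keyword, take the best (lowest) tier.
--
--     Correct because tiers are numbered in A's branch-priority order, so the
--     minimum tier among ALL matching keywords equals the first branch that fires.
--     """
--     low = condition.lower()
--     tier = min((t for k, t in _KEYWORD_TIER.items() if k in low), default=3)
--     parts = [f"Patient presents with dermatological lesion consistent with {condition}. ",
--              _BLOCKS[tier]]
--     if clinical_findings:
--         flags = clinical_findings.get("red_flags")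
--         if flags:
--             parts.append(f" Red flag indicators present: {', '.join(flags)}.")
--     return "".join(parts)
-- ===== Notes on version B (the rewrite author's own statement) =====
-- stated objective: alternative
-- what changed: Replaces A's short-circuiting if/elif cascade by an exhaustive scoring pass: every keyword carries a tier number in a flat keyword->tier map, the minimum tier among all matching keywords (default 3) indexes a block table, and the output is assembled as a parts list joined at the end; correct because tiers follow A's branch priority so the minimum equals the first branch that fires.
import Mathlib
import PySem

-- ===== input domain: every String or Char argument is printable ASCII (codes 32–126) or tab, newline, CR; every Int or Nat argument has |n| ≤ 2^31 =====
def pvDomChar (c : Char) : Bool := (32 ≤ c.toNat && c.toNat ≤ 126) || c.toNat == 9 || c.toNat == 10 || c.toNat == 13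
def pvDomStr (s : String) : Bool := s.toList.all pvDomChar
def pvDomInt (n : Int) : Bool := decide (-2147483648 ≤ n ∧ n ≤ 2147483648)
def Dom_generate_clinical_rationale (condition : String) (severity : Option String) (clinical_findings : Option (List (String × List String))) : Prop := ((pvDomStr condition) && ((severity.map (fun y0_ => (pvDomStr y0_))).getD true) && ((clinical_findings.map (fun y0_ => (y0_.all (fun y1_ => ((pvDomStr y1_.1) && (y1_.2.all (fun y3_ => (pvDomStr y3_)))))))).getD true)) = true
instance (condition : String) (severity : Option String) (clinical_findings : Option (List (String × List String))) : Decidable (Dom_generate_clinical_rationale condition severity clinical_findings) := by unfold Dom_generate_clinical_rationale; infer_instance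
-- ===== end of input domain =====

-- B replaces A's short-circuiting if/elif cascade by an exhaustive keyword-scoring pass (minimum tier over a flat keyword->tier map, default 3) indexing a block table, assembling the output as a joined parts list; same cost, different structure.

-- ===== PORT A =====
-- dict.get("red_flags") on the association list: first-match lookup (exact — Python dict keys are unique)
def pvDictGetRedFlags (cf : List (String × List String)) : Option (List String) :=
  (cf.find? (fun p => p.1 == "red_flags")).map (·.2)

def generate_clinical_rationale (condition : String) (severity : Option String) (clinical_findings : Option (List (String × List String))) : String :=
  let rationale := "Patient presents with dermatological lesion consistent with " ++ condition ++ ". "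
  let rationale :=
    if ["melanoma", "carcinoma", "malignant"].any (fun term => PySem.Str.isIn term (PySem.Str.lower condition)) then
      rationale ++ "AI analysis indicates features concerning for malignancy. Tissue diagnosis is medically necessary for definitive diagnosis and to guide appropriate treatment. Early detection and treatment significantly impact prognosis and survival outcomes."
    else if PySem.Str.isIn "actinic keratosis" (PySem.Str.lower condition) then
      rationale ++ "This premalignant condition has risk of progression to invasive squamous cell carcinoma. Treatment is preventive care and represents standard of care to reduce cancer risk."
    else if ["dermatitis", "eczema", "psoriasis"].any (fun term => PySem.Str.isIn term (PySem.Str.lower condition)) then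
      rationale ++ "Chronic inflammatory skin condition requires comprehensive evaluation and treatment. Condition significantly impacts quality of life and may lead to complications if untreated. Treatment follows evidence-based guidelines and is medically necessary."
    else
      rationale ++ "Clinical and AI-assisted evaluation indicates need for professional dermatological assessment. Appropriate diagnostic procedures are necessary for accurate diagnosis and treatment planning."
  -- 'if clinical_findings and clinical_findings.get("red_flags"):' — Python truthiness of the optional dict, then of the list
  match clinical_findings with
  | none => rationale
  | some cf =>
    if cf.isEmpty then rationale
    else
      match pvDictGetRedFlags cf with
      | none => rationale
      | some flags =>
        if flags.isEmpty then rationale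
        else rationale ++ " Red flag indicators present: " ++ PySem.Str.join ", " flags ++ "."

-- ===== PORT B =====
-- _KEYWORD_TIER: flat keyword -> tier map in insertion order
def pvKeywordTier : List (String × Int) :=
  [("melanoma", 0), ("carcinoma", 0), ("malignant", 0),
   ("actinic keratosis", 1),
   ("dermatitis", 2), ("eczema", 2), ("psoriasis", 2)]

-- _BLOCKS
def pvBlocks : List String :=
  ["AI analysis indicates features concerning for malignancy. Tissue diagnosis is medically necessary for definitive diagnosis and to guide appropriate treatment. Early detection and treatment significantly impact prognosis and survival outcomes.",
   "This premalignant condition has risk of progression to invasive squamous cell carcinoma. Treatment is preventive care and represents standard of care to reduce cancer risk.",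
   "Chronic inflammatory skin condition requires comprehensive evaluation and treatment. Condition significantly impacts quality of life and may lead to complications if untreated. Treatment follows evidence-based guidelines and is medically necessary.",
   "Clinical and AI-assisted evaluation indicates need for professional dermatological assessment. Appropriate diagnostic procedures are necessary for accurate diagnosis and treatment planning."]

def generate_clinical_rationale_alt (condition : String) (severity : Option String) (clinical_findings : Option (List (String × List String))) : String :=
  let low := PySem.Str.lower condition
  -- min((t for k, t in _KEYWORD_TIER.items() if k in low), default=3)
  let tier : Int :=
    (PySem.List.min? (pvKeywordTier.filterMap
        (fun kt => if PySem.Str.isIn kt.1 low then some kt.2 else none)) (fun t => t)).getD 3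
  -- _BLOCKS[tier]; tier is always 0..3 so the index is in range (the getD "" default is unreachable)
  let parts := ["Patient presents with dermatological lesion consistent with " ++ condition ++ ". ",
                (PySem.List.pyGet? pvBlocks tier).getD ""]
  let parts :=
    match clinical_findings with
    | none => parts
    | some cf =>
      if cf.isEmpty then parts
      else
        match (cf.find? (fun p => p.1 == "red_flags")).map (·.2) with
        | none => parts
        | some flags =>
          if flags.isEmpty then parts
          else parts ++ [" Red flag indicators present: " ++ PySem.Str.join ", " flags ++ "."]
  PySem.Str.join "" parts

-- ===== PRECONDITION & SPEC =====
def Spec_generate_clinical_rationale (condition : String) (severity : Option String) (clinical_findings : Option (List (String × List String))) (out : String) : Prop := out = generate_clinical_rationale_alt condition severity clinical_findings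
instance (condition : String) (severity : Option String) (clinical_findings : Option (List (String × List String))) (out : String) : Decidable (Spec_generate_clinical_rationale condition severity clinical_findings out) := by unfold Spec_generate_clinical_rationale; infer_instance

-- ===== CLAIM =====
def Claim_equal_generate_clinical_rationale : Prop := ∀ (condition : String) (severity : Option String) (clinical_findings : Option (List (String × List String))), Dom_generate_clinical_rationale condition severity clinical_findings → Spec_generate_clinical_rationale condition severity clinical_findings (generate_clinical_rationale condition severity clinical_findings)

-- ===== LEMMAS AND PROOFS =====

-- ''.join of two / three strings is plain concatenation
theorem pv_join2 (x y : String) : PySem.Str.join "" [x, y] = x ++ y := by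
  simp [PySem.Str.join]
  ext1
  simp [PySem.Chars.join_cons_cons, PySem.Chars.join_singleton]

theorem pv_join3 (x y z : String) : PySem.Str.join "" [x, y, z] = x ++ (y ++ z) := by
  simp [PySem.Str.join]
  ext1
  simp [PySem.Chars.join_cons_cons, PySem.Chars.join_singleton]

-- A's if/elif block selection equals B's min-tier table lookup
set_option maxHeartbeats 4000000 in
theorem pv_sel (c p : String) :
    (if ["melanoma", "carcinoma", "malignant"].any (fun term => PySem.Str.isIn term (PySem.Str.lower c)) then
       p ++ "AI analysis indicates features concerning for malignancy. Tissue diagnosis is medically necessary for definitive diagnosis and to guide appropriate treatment. Early detection and treatment significantly impact prognosis and survival outcomes."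
     else if PySem.Str.isIn "actinic keratosis" (PySem.Str.lower c) then
       p ++ "This premalignant condition has risk of progression to invasive squamous cell carcinoma. Treatment is preventive care and represents standard of care to reduce cancer risk."
     else if ["dermatitis", "eczema", "psoriasis"].any (fun term => PySem.Str.isIn term (PySem.Str.lower c)) then
       p ++ "Chronic inflammatory skin condition requires comprehensive evaluation and treatment. Condition significantly impacts quality of life and may lead to complications if untreated. Treatment follows evidence-based guidelines and is medically necessary."
     else
       p ++ "Clinical and AI-assisted evaluation indicates need for professional dermatological assessment. Appropriate diagnostic procedures are necessary for accurate diagnosis and treatment planning.")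
    = p ++ (PySem.List.pyGet? pvBlocks
        ((PySem.List.min? (pvKeywordTier.filterMap
          (fun kt => if PySem.Str.isIn kt.1 (PySem.Str.lower c) then some kt.2 else none)) (fun t => t)).getD 3)).getD "" := by
  cases h1 : PySem.Str.isIn "melanoma" (PySem.Str.lower c) <;>
  cases h2 : PySem.Str.isIn "carcinoma" (PySem.Str.lower c) <;>
  cases h3 : PySem.Str.isIn "malignant" (PySem.Str.lower c) <;>
  cases h4 : PySem.Str.isIn "actinic keratosis" (PySem.Str.lower c) <;>
  cases h5 : PySem.Str.isIn "dermatitis" (PySem.Str.lower c) <;>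
  cases h6 : PySem.Str.isIn "eczema" (PySem.Str.lower c) <;>
  cases h7 : PySem.Str.isIn "psoriasis" (PySem.Str.lower c) <;>
    simp_all [pvKeywordTier, pvBlocks,
      PySem.List.min?, PySem.List.pyGet?, PySem.List.pyIdx?]

-- ===== VERDICT =====
set_option maxHeartbeats 1000000 in
theorem generate_clinical_rationale_spec : Claim_equal_generate_clinical_rationale := by
  intro condition severity clinical_findings _
  unfold Spec_generate_clinical_rationale generate_clinical_rationale generate_clinical_rationale_alt pvDictGetRedFlags
  simp only [pv_sel]
  cases clinical_findings with
  | none => simp [pv_join2]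
  | some cf =>
    by_cases hcf : cf.isEmpty
    · simp [hcf, pv_join2]
    · cases hfind : (cf.find? (fun p => p.1 == "red_flags")).map (·.2) with
      | none => simp [hcf, hfind, pv_join2]
      | some flags =>
        by_cases hfl : flags.isEmpty
        · simp [hcf, hfind, hfl, pv_join2]
        · simp [hcf, hfind, hfl, pv_join3, String.append_assoc]
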